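-- pv_equiv track=rewrite | github.com/marc-chenhao/TextAnalysis | TextClassification/src/ShowResults.py | compare_two
-- ===== SOURCE A (Python) =====
-- def compare_two(y_true,y_pred_1,y_pred_2):
--     both_correct = 0
--     both_wrong = 0
--     pred_1_correct = 0
--     pred_2_correct = 0
--     for i in range(len(y_true)):
--         if y_pred_1[i] == y_true[i] and y_pred_2[i] == y_true[i]:
--             both_correct += 1
--         elif y_pred_1[i] == y_true[i] and y_pred_2[i] != y_true[i]:
--             pred_1_correct += 1
--         elif y_pred_1[i] != y_true[i] and y_pred_2[i] == y_true[i]: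
--             pred_2_correct += 1
--         elif y_pred_1[i] != y_true[i] and y_pred_2[i] != y_true[i]:
--             both_wrong += 1
--     return (both_correct,both_wrong,pred_1_correct,pred_2_correct)
-- ===== SOURCE B (Python) =====
-- def compare_two(y_true, y_pred_1, y_pred_2):
--     n = len(y_true)
--     c1 = sum(y_pred_1[i] == y_true[i] for i in range(n))
--     c2 = sum(y_pred_2[i] == y_true[i] for i in range(n))
--     both = sum(y_pred_1[i] == y_true[i] and y_pred_2[i] == y_true[i] for i in range(n))
--     return (both, n - c1 - c2 + both, c1 - both, c2 - both)
-- ===== Notes on version B (the rewrite author's own statement) =====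
-- stated objective: alternative
-- what changed: Replaces the single pass with a four-way elif cascade by three branch-free marginal counts (pred1 correct, pred2 correct, both correct) summed in staged passes, recovering the four categories by inclusion-exclusion arithmetic.
import Mathlib
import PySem

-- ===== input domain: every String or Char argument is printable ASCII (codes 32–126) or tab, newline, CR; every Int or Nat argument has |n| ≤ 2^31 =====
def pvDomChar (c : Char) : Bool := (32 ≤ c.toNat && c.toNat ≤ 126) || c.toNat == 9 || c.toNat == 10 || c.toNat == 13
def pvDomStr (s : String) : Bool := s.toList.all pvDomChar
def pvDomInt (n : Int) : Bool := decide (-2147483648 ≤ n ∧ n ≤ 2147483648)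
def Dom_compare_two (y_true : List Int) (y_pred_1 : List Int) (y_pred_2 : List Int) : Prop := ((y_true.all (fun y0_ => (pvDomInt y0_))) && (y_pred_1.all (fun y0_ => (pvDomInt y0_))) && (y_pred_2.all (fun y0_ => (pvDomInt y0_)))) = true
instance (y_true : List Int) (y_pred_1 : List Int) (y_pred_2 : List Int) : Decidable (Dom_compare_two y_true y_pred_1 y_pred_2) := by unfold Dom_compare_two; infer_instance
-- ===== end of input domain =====

-- B computes three marginal counts in staged passes and derives the four categories by
-- inclusion-exclusion, instead of A's single pass with a four-way branch cascade; same O(n) cost.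

-- ===== PORT A =====
def compare_two (y_true : List Int) (y_pred_1 : List Int) (y_pred_2 : List Int) : Int × Int × Int × Int :=
  (PySem.List.pyRange 0 (PySem.List.len y_true) 1).foldl
    (fun (s : Int × Int × Int × Int) i =>
      let both_correct := s.1
      let both_wrong := s.2.1
      let pred_1_correct := s.2.2.1
      let pred_2_correct := s.2.2.2
      if (PySem.List.pyGetD y_pred_1 i 0 == PySem.List.pyGetD y_true i 0) &&
           (PySem.List.pyGetD y_pred_2 i 0 == PySem.List.pyGetD y_true i 0) then
          (both_correct + 1, both_wrong, pred_1_correct, pred_2_correct)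
        else if (PySem.List.pyGetD y_pred_1 i 0 == PySem.List.pyGetD y_true i 0) &&
                !(PySem.List.pyGetD y_pred_2 i 0 == PySem.List.pyGetD y_true i 0) then
          (both_correct, both_wrong, pred_1_correct + 1, pred_2_correct)
        else if !(PySem.List.pyGetD y_pred_1 i 0 == PySem.List.pyGetD y_true i 0) &&
                (PySem.List.pyGetD y_pred_2 i 0 == PySem.List.pyGetD y_true i 0) then
          (both_correct, both_wrong, pred_1_correct, pred_2_correct + 1)
        else if !(PySem.List.pyGetD y_pred_1 i 0 == PySem.List.pyGetD y_true i 0) &&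
                !(PySem.List.pyGetD y_pred_2 i 0 == PySem.List.pyGetD y_true i 0) then
          (both_correct, both_wrong + 1, pred_1_correct, pred_2_correct)
        else
          (both_correct, both_wrong, pred_1_correct, pred_2_correct))
    (0, 0, 0, 0)

-- ===== PORT B =====
def compare_two_alt (y_true : List Int) (y_pred_1 : List Int) (y_pred_2 : List Int) : Int × Int × Int × Int :=
  let n := PySem.List.len y_true
  let c1 : Int := (PySem.List.pyRange 0 n 1).foldl
    (fun s i => s + (if PySem.List.pyGetD y_pred_1 i 0 == PySem.List.pyGetD y_true i 0 then 1 else 0)) 0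
  let c2 : Int := (PySem.List.pyRange 0 n 1).foldl
    (fun s i => s + (if PySem.List.pyGetD y_pred_2 i 0 == PySem.List.pyGetD y_true i 0 then 1 else 0)) 0
  let both : Int := (PySem.List.pyRange 0 n 1).foldl
    (fun s i => s + (if (PySem.List.pyGetD y_pred_1 i 0 == PySem.List.pyGetD y_true i 0) &&
                        (PySem.List.pyGetD y_pred_2 i 0 == PySem.List.pyGetD y_true i 0) then 1 else 0)) 0
  (both, n - c1 - c2 + both, c1 - both, c2 - both)

-- ===== PRECONDITION & SPEC =====
-- Pre_ excludes exactly the ragged inputs (a prediction list shorter than y_true) on which A raises IndexError.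
def Pre_compare_two (y_true : List Int) (y_pred_1 : List Int) (y_pred_2 : List Int) : Prop :=
  y_true.length ≤ y_pred_1.length ∧ y_true.length ≤ y_pred_2.length
instance (y_true : List Int) (y_pred_1 : List Int) (y_pred_2 : List Int) : Decidable (Pre_compare_two y_true y_pred_1 y_pred_2) := by unfold Pre_compare_two; infer_instance
def pvWitness_compare_two : List Int × List Int × List Int := ([0, 1, 2], [0, 2, 2], [1, 1, 2])

def Spec_compare_two (y_true : List Int) (y_pred_1 : List Int) (y_pred_2 : List Int) (out : Int × Int × Int × Int) : Prop := out = compare_two_alt y_true y_pred_1 y_pred_2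
instance (y_true : List Int) (y_pred_1 : List Int) (y_pred_2 : List Int) (out : Int × Int × Int × Int) : Decidable (Spec_compare_two y_true y_pred_1 y_pred_2 out) := by unfold Spec_compare_two; infer_instance

-- ===== CLAIM =====
def Claim_equal_compare_two : Prop := ∀ (y_true : List Int) (y_pred_1 : List Int) (y_pred_2 : List Int), Dom_compare_two y_true y_pred_1 y_pred_2 → Pre_compare_two y_true y_pred_1 y_pred_2 → Spec_compare_two y_true y_pred_1 y_pred_2 (compare_two y_true y_pred_1 y_pred_2)

-- ===== LEMMAS AND PROOFS =====

-- A's loop with abstract per-index tests f, g: the four counters are four countP's.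
theorem aloop (f g : Int → Bool) (l : List Int) (a b c d : Int) :
    l.foldl
      (fun (s : Int × Int × Int × Int) i =>
        let bc := s.1
        let bw := s.2.1
        let c1 := s.2.2.1
        let c2 := s.2.2.2
        if f i && g i then (bc + 1, bw, c1, c2)
        else if f i && !g i then (bc, bw, c1 + 1, c2)
        else if !f i && g i then (bc, bw, c1, c2 + 1)
        else if !f i && !g i then (bc, bw + 1, c1, c2)
        else (bc, bw, c1, c2))
      (a, b, c, d)
    = (a + l.countP (fun i => f i && g i),
       b + l.countP (fun i => !f i && !g i),
       c + l.countP (fun i => f i && !g i),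
       d + l.countP (fun i => !f i && g i)) := by
  induction l generalizing a b c d with
  | nil => simp
  | cons x t ih =>
    rw [List.foldl_cons]
    cases hf : f x <;> cases hg : g x <;>
      simp only [hf, hg, Bool.not_true, Bool.not_false,
        Bool.and_true, Bool.and_false, if_true] <;>
      rw [ih] <;> simp [hf, hg] <;> ring_nf

-- B's indicator sum is a countP.
theorem bsum (p : Int → Bool) (l : List Int) (a : Int) :
    l.foldl (fun s i => s + (if p i then 1 else 0)) a = a + l.countP p := by
  induction l generalizing a with
  | nil => simp
  | cons x t ih =>
    rw [List.foldl_cons, ih]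
    cases h : p x <;> simp [h] <;> ring

-- countP splits by a second predicate.
theorem countP_split (f g : Int → Bool) (l : List Int) :
    l.countP f = l.countP (fun i => f i && g i) + l.countP (fun i => f i && !g i) := by
  induction l with
  | nil => simp
  | cons x t ih =>
    cases hf : f x <;> cases hg : g x <;> simp [hf, hg, ih] <;> omega

-- length splits into the four cells.
theorem length_split (f g : Int → Bool) (l : List Int) :
    l.length = l.countP (fun i => f i && g i) + l.countP (fun i => f i && !g i)
      + l.countP (fun i => !f i && g i) + l.countP (fun i => !f i && !g i) := by
  induction l with
  | nil => simp
  | cons x t ih =>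
    cases hf : f x <;> cases hg : g x <;> simp [hf, hg] <;> omega

-- ===== VERDICT =====
theorem compare_two_spec : Claim_equal_compare_two := by
  intro y_true y_pred_1 y_pred_2 _ _
  unfold Spec_compare_two compare_two compare_two_alt
  rw [aloop (fun i => PySem.List.pyGetD y_pred_1 i 0 == PySem.List.pyGetD y_true i 0)
        (fun i => PySem.List.pyGetD y_pred_2 i 0 == PySem.List.pyGetD y_true i 0)]
  simp only [bsum]
  set L := PySem.List.pyRange 0 (PySem.List.len y_true) 1 with hL
  have hlen : (L.length : Int) = PySem.List.len y_true := by
    rw [hL, PySem.List.length_pyRange_one]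
    simp [PySem.List.len]
  have h1 := countP_split (fun i => PySem.List.pyGetD y_pred_1 i 0 == PySem.List.pyGetD y_true i 0)
    (fun i => PySem.List.pyGetD y_pred_2 i 0 == PySem.List.pyGetD y_true i 0) L
  have h2 := countP_split (fun i => PySem.List.pyGetD y_pred_2 i 0 == PySem.List.pyGetD y_true i 0)
    (fun i => PySem.List.pyGetD y_pred_1 i 0 == PySem.List.pyGetD y_true i 0) L
  have h3 := length_split (fun i => PySem.List.pyGetD y_pred_1 i 0 == PySem.List.pyGetD y_true i 0)
    (fun i => PySem.List.pyGetD y_pred_2 i 0 == PySem.List.pyGetD y_true i 0) L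
  have h2' : L.countP (fun i => (PySem.List.pyGetD y_pred_2 i 0 == PySem.List.pyGetD y_true i 0) &&
        (PySem.List.pyGetD y_pred_1 i 0 == PySem.List.pyGetD y_true i 0))
      = L.countP (fun i => (PySem.List.pyGetD y_pred_1 i 0 == PySem.List.pyGetD y_true i 0) &&
        (PySem.List.pyGetD y_pred_2 i 0 == PySem.List.pyGetD y_true i 0)) := by
    apply List.countP_congr; intro x _
    cases PySem.List.pyGetD y_pred_1 x 0 == PySem.List.pyGetD y_true x 0 <;>
      cases PySem.List.pyGetD y_pred_2 x 0 == PySem.List.pyGetD y_true x 0 <;> simp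
  have h2'' : L.countP (fun i => (PySem.List.pyGetD y_pred_2 i 0 == PySem.List.pyGetD y_true i 0) &&
        !(PySem.List.pyGetD y_pred_1 i 0 == PySem.List.pyGetD y_true i 0))
      = L.countP (fun i => !(PySem.List.pyGetD y_pred_1 i 0 == PySem.List.pyGetD y_true i 0) &&
        (PySem.List.pyGetD y_pred_2 i 0 == PySem.List.pyGetD y_true i 0)) := by
    apply List.countP_congr; intro x _
    cases PySem.List.pyGetD y_pred_1 x 0 == PySem.List.pyGetD y_true x 0 <;>
      cases PySem.List.pyGetD y_pred_2 x 0 == PySem.List.pyGetD y_true x 0 <;> simp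
  rw [h2', h2''] at h2
  refine Prod.ext ?_ (Prod.ext ?_ (Prod.ext ?_ ?_)) <;> simp only [] <;>
    (try rw [← hlen]) <;> push_cast <;> omega
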